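-- pv_equiv track=rewrite | github.com/vsstech/swe_agent_repo2 | src/swe_demo/utils.py | very_long_function
-- ===== SOURCE A (Python) =====
-- def very_long_function(n: int) -> int:
--     # intentionally long and repetitive to simulate "needs refactor"
--     total = 0
--     for i in range(n):
--         if i % 2 == 0:
--             total += i
--         else:
--             total += i * 2
--
--     for j in range(n):
--         if j % 2 == 0:
--             total += j
--         else:
--             total += j * 2
--
--     return total
-- ===== SOURCE B (Python) =====
-- def very_long_function(n: int) -> int:
--     # Closed form: each pass adds sum(range(n)) plus the sum of the odd i again,
--     # and the two passes are identical, so double it.  O(1) instead of O(n).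
--     if n <= 0:
--         return 0
--     k = n // 2  # number of odd indices in range(n); their sum is k*k
--     return n * (n - 1) + 2 * k * k
-- ===== Notes on version B (the rewrite author's own statement) =====
-- stated objective: faster
-- what changed: Replaced the two O(n) accumulation loops with a single closed-form arithmetic expression n*(n-1) + 2*(n//2)^2 (sum of indices plus sum of odd indices, doubled).
import Mathlib
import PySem

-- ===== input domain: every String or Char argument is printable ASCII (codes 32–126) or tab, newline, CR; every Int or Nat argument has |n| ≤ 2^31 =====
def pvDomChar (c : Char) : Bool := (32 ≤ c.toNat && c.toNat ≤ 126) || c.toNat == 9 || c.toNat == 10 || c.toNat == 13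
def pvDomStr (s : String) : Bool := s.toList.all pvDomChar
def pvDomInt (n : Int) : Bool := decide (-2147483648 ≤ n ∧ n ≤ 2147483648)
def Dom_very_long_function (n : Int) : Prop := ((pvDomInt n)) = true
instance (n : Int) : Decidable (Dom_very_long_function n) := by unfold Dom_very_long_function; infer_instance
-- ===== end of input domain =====

-- B replaces A's two O(n) weighted-sum loops by one closed-form arithmetic expression (objective: faster).


-- ===== PORT A =====
-- loop body of both of A's loops: total += i if i even else total += i*2
def vlfBody (total i : Int) : Int :=
  if PySem.Int.mod i 2 = 0 then total + i else total + i * 2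

def very_long_function (n : Int) : Int :=
  let total := (PySem.List.pyRange 0 n 1).foldl vlfBody 0
  (PySem.List.pyRange 0 n 1).foldl vlfBody total

-- ===== PORT B =====
def very_long_function_alt (n : Int) : Int :=
  if n ≤ 0 then 0
  else
    let k := PySem.Int.floordiv n 2
    n * (n - 1) + 2 * k * k

-- ===== PRECONDITION & SPEC =====
def Spec_very_long_function (n : Int) (out : Int) : Prop := out = very_long_function_alt n
instance (n : Int) (out : Int) : Decidable (Spec_very_long_function n out) := by unfold Spec_very_long_function; infer_instance

-- ===== CLAIM (what is proved, stated in full; the proofs are below) =====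
def Claim_equal_very_long_function : Prop := ∀ (n : Int), Dom_very_long_function n → Spec_very_long_function n (very_long_function n)

-- ===== LEMMAS AND PROOFS =====

theorem vlfBody_shift (l : List Int) (t : Int) :
    l.foldl vlfBody t = t + l.foldl vlfBody 0 := by
  induction l generalizing t with
  | nil => simp
  | cons a l ih =>
    simp only [List.foldl_cons]
    rw [ih (vlfBody t a), ih (vlfBody 0 a)]
    unfold vlfBody
    split_ifs <;> ring

theorem vlfBody_eval (t i : Int) :
    vlfBody t i = t + (if PySem.Int.mod i 2 = 0 then i else i * 2) := by
  unfold vlfBody; split_ifs <;> ring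

-- one pass, doubled: 2 * sum = m*(m-1) + 2*(m/2)^2
theorem vlf_pass_closed (m : Nat) :
    2 * (PySem.List.pyRange 0 (m : Int) 1).foldl vlfBody 0 =
      (m : Int) * ((m : Int) - 1) + 2 * ((m : Int) / 2) * ((m : Int) / 2) := by
  induction m with
  | zero => simp [PySem.List.pyRange_one_eq_nil]
  | succ m ih =>
    have h0 : (0 : Int) ≤ (m : Int) := Int.natCast_nonneg m
    have hsplit : PySem.List.pyRange 0 ((m : Int) + 1) 1 =
        PySem.List.pyRange 0 (m : Int) 1 ++ [(m : Int)] :=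
      PySem.List.pyRange_one_succ_right h0
    push_cast
    rw [hsplit, List.foldl_append]
    simp only [List.foldl_cons, List.foldl_nil]
    rw [vlfBody_shift, vlfBody_eval]
    have hq : ∃ q : Int, (m : Int) = 2*q ∨ (m : Int) = 2*q + 1 := ⟨(m : Int) / 2, by omega⟩
    obtain ⟨q, hm | hm⟩ := hq
    · have hmod : PySem.Int.mod (m : Int) 2 = 0 := by
        simp [PySem.Int.mod, Int.fmod_eq_emod]; omega
      have hd1 : ((m : Int) + 1) / 2 = q := by omega
      have hd2 : ((m : Int)) / 2 = q := by omega
      rw [if_pos hmod, hd1]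
      rw [hd2] at ih
      linear_combination ih
    · have hmod : ¬ PySem.Int.mod (m : Int) 2 = 0 := by
        simp [PySem.Int.mod, Int.fmod_eq_emod]; omega
      have hd1 : ((m : Int) + 1) / 2 = q + 1 := by omega
      have hd2 : ((m : Int)) / 2 = q := by omega
      rw [if_neg hmod, hd1]
      rw [hd2] at ih
      linear_combination ih + 2 * hm

-- ===== VERDICT (by name: the statement is the Claim_ definition above) =====
theorem very_long_function_spec : Claim_equal_very_long_function := by
  intro n _
  unfold Spec_very_long_function very_long_function very_long_function_alt
  by_cases hn : n ≤ 0
  · rw [if_pos hn]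
    simp [PySem.List.pyRange_one_eq_nil hn]
  · rw [if_neg hn]
    rw [not_le] at hn
    have hcast : ((n.toNat : Int)) = n := Int.toNat_of_nonneg (le_of_lt hn)
    have h := vlf_pass_closed n.toNat
    rw [hcast] at h
    rw [vlfBody_shift]
    have hfd : PySem.Int.floordiv n 2 = n / 2 := by
      simp [PySem.Int.floordiv]
      exact Int.fdiv_eq_ediv_of_nonneg n (by omega)
    rw [hfd]
    linear_combination h
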